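-- pv_equiv track=rewrite | github.com/DmitriyBeresnev/GeeksForGeeksPractice | 2021/August/Day2/GeekCollectsTheBalls.py | maxBalls
-- ===== SOURCE A (Python) =====
-- def maxBalls(N, M, a, b):
--     # code here
--     first = 0
--     second = 0
--     res = 0
--     i = 0
--     j = 0
--     while(i < N and j < M):
--         if a[i] < b[j]:
--             first += a[i]
--             i += 1
--         elif a[i] > b[j]:
--             second += b[j]
--             j += 1
--         else:
--             res += max(first, second) + a[i]
--             first = 0
--             second = 0
--             temp = a[i]
--             i += 1
--             temp = b[j]
--             j += 1
--             while(i < N and a[i] == temp):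
--                 res += a[i]
--                 i += 1
--             while (j < M and b[j] == temp):
--                 res += b[j]
--                 j += 1
--     while(i < N):
--         first += a[i]
--         i += 1
--     while(j < M):
--         second += b[j]
--         j += 1
--     res += max(first, second)
--     return res
-- ===== SOURCE B (Python) =====
-- def _runs(xs):
--     runs = []
--     i = 0
--     n = len(xs)
--     while i < n:
--         v = xs[i]
--         s = v
--         i += 1
--         while i < n and xs[i] == v:
--             s += xs[i]
--             i += 1
--         runs.append((v, s))
--     return runs
--
--
-- def maxBalls(N, M, a, b):
--     ra = _runs(a[:max(N, 0)])
--     rb = _runs(b[:max(M, 0)])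
--     first = second = res = 0
--     i = j = 0
--     while i < len(ra) and j < len(rb):
--         va, sa = ra[i]
--         vb, sb = rb[j]
--         if va < vb:
--             first += sa
--             i += 1
--         elif vb < va:
--             second += sb
--             j += 1
--         else:
--             res += max(first, second) + sa + sb - va
--             first = second = 0
--             i += 1
--             j += 1
--     while i < len(ra):
--         first += ra[i][1]
--         i += 1
--     while j < len(rb):
--         second += rb[j][1]
--         j += 1
--     return res + max(first, second)
-- ===== Notes on version B (the rewrite author's own statement) =====
-- stated objective: alternative
-- what changed: B first compresses each prefix a[:N], b[:M] into run-length (value, run-sum) pairs and then does a single two-pointer merge over runs, replacing A's element-by-element merge with its nested duplicate-consuming inner while loops by one per-run update res += max(first,second)+sumA+sumB-value.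
import Mathlib
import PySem

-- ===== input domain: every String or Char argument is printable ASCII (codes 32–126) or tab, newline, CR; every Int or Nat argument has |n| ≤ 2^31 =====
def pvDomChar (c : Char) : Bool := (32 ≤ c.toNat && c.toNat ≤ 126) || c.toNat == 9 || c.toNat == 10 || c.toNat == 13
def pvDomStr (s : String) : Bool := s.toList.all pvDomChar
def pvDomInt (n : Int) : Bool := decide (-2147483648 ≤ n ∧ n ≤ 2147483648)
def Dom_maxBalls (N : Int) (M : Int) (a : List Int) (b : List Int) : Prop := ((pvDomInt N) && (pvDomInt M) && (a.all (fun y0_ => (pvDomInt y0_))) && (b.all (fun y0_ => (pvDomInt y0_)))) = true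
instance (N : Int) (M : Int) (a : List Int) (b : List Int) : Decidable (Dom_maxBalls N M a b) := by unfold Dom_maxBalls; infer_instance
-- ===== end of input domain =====

-- B replaces A's element-by-element merge (with nested duplicate-consuming inner
-- loops) by a run-length compression of each prefix followed by a single
-- two-pointer merge over (value, run-sum) pairs; same O(N+M) cost, different
-- decomposition.  (The Nat fuel parameters of the loop helpers are totality
-- guards only; each is called with enough fuel for its loop.)

-- ===== PORT A =====

-- inner 'while (i < N and xs[i] == temp): res += xs[i]; i += 1' (both inner loops of A)
def dupLoop : Nat → Int → List Int → Int → Int → Int → Int × Int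
  | 0, _, _, _, res, i => (res, i)
  | fuel + 1, N, xs, temp, res, i =>
    if i < N ∧ (PySem.List.pyGet? xs i).getD 0 = temp then
      dupLoop fuel N xs temp (res + (PySem.List.pyGet? xs i).getD 0) (i + 1)
    else (res, i)

-- trailing 'while (i < N): acc += xs[i]; i += 1' (both tail loops of A)
def tailLoop : Nat → Int → List Int → Int → Int → Int
  | 0, _, _, acc, _ => acc
  | fuel + 1, N, xs, acc, i =>
    if i < N then tailLoop fuel N xs (acc + (PySem.List.pyGet? xs i).getD 0) (i + 1) else acc

-- the main 'while (i < N and j < M)' loop; on exit it runs the two tail loops and adds max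
def mbLoop : Nat → Int → Int → List Int → List Int → Int → Int → Int → Int → Int → Int
  | 0, N, M, a, b, first, second, res, i, j =>
    res + max (tailLoop (N - i).toNat N a first i) (tailLoop (M - j).toNat M b second j)
  | fuel + 1, N, M, a, b, first, second, res, i, j =>
    if i < N ∧ j < M then
      let ai := (PySem.List.pyGet? a i).getD 0
      let bj := (PySem.List.pyGet? b j).getD 0
      if ai < bj then mbLoop fuel N M a b (first + ai) second res (i + 1) j
      else if bj < ai then mbLoop fuel N M a b first (second + bj) res i (j + 1)
      else
        let p := dupLoop (N - (i + 1)).toNat N a bj (res + max first second + ai) (i + 1)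
        let q := dupLoop (M - (j + 1)).toNat M b bj p.1 (j + 1)
        mbLoop fuel N M a b 0 0 q.1 p.2 q.2
    else
      res + max (tailLoop (N - i).toNat N a first i) (tailLoop (M - j).toNat M b second j)

def maxBalls (N : Int) (M : Int) (a : List Int) (b : List Int) : Int :=
  mbLoop (N.toNat + M.toNat + 1) N M a b 0 0 0 0 0

-- ===== PORT B =====

-- inner loop of _runs: sums the leading run of v, returns (sum, rest)
def consume (v : Int) : List Int → Int → Int × List Int
  | [], acc => (acc, [])
  | x :: xs, acc => if x = v then consume v xs (acc + x) else (acc, x :: xs)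

-- _runs: compress a list into (value, run-sum) pairs
def runsOf : Nat → List Int → List (Int × Int)
  | 0, _ => []
  | _, [] => []
  | fuel + 1, x :: xs =>
    let p := consume x xs x
    (x, p.1) :: runsOf fuel p.2

-- trailing 'while: acc += runs[k][1]' loops of B
def sumSnd : List (Int × Int) → Int → Int
  | [], acc => acc
  | p :: ps, acc => sumSnd ps (acc + p.2)

-- the two-pointer merge over the two run lists
def runMerge : Nat → List (Int × Int) → List (Int × Int) → Int → Int → Int → Int
  | 0, ra, rb, f, s, r => r + max (sumSnd ra f) (sumSnd rb s)
  | fuel + 1, ra, rb, f, s, r =>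
    match ra, rb with
    | (va, sa) :: ra', (vb, sb) :: rb' =>
      if va < vb then runMerge fuel ra' ((vb, sb) :: rb') (f + sa) s r
      else if vb < va then runMerge fuel ((va, sa) :: ra') rb' f (s + sb) r
      else runMerge fuel ra' rb' 0 0 (r + max f s + sa + sb - va)
    | ra, rb => r + max (sumSnd ra f) (sumSnd rb s)

def maxBalls_alt (N : Int) (M : Int) (a : List Int) (b : List Int) : Int :=
  let ea := PySem.List.slice a none (some (max N 0))
  let eb := PySem.List.slice b none (some (max M 0))
  let ra := runsOf ea.length ea
  let rb := runsOf eb.length eb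
  runMerge (ra.length + rb.length) ra rb 0 0 0

-- ===== PRECONDITION & SPEC =====
-- Pre_ is exactly where the Python A returns: for N > len(a) or M > len(b) A's
-- index loops run past the end of a list and raise IndexError.
def Pre_maxBalls (N : Int) (M : Int) (a : List Int) (b : List Int) : Prop :=
  N ≤ (a.length : Int) ∧ M ≤ (b.length : Int)
instance (N : Int) (M : Int) (a : List Int) (b : List Int) : Decidable (Pre_maxBalls N M a b) := by unfold Pre_maxBalls; infer_instance

def pvWitness_maxBalls : Int × Int × List Int × List Int := (2, 2, [1, 2], [2, 3])

def Spec_maxBalls (N : Int) (M : Int) (a : List Int) (b : List Int) (out : Int) : Prop := out = maxBalls_alt N M a b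
instance (N : Int) (M : Int) (a : List Int) (b : List Int) (out : Int) : Decidable (Spec_maxBalls N M a b out) := by unfold Spec_maxBalls; infer_instance

-- ===== CLAIM (what is proved, stated in full; the proofs are below) =====
def Claim_equal_maxBalls : Prop := ∀ (N : Int) (M : Int) (a : List Int) (b : List Int), Dom_maxBalls N M a b → Pre_maxBalls N M a b → Spec_maxBalls N M a b (maxBalls N M a b)

-- ===== LEMMAS AND PROOFS =====

theorem consume_len (v : Int) (xs : List Int) (acc : Int) :
    (consume v xs acc).2.length ≤ xs.length := by
  induction xs generalizing acc with
  | nil => simp [consume]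
  | cons x xs ih =>
    simp only [consume]
    split
    · exact le_trans (ih _) (by simp)
    · simp

-- proof-side run compression without the fuel guard
def runs' : List Int → List (Int × Int)
  | [] => []
  | x :: xs =>
    let p := consume x xs x
    (x, p.1) :: runs' p.2
termination_by xs => xs.length
decreasing_by
  have h := consume_len x xs x
  simpa using Nat.lt_succ_of_le h

-- proof-side middle ground: A's merge expressed structurally on the two truncated lists
def mergeA : List Int → List Int → Int → Int → Int → Int
  | x :: xs, y :: ys, f, s, r =>
    if x < y then mergeA xs (y :: ys) (f + x) s r
    else if y < x then mergeA (x :: xs) ys f (s + y) r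
    else
      let p := consume y xs (r + max f s + x)
      let q := consume y ys p.1
      mergeA p.2 q.2 0 0 q.1
  | xs, ys, f, s, r => r + max (f + xs.sum) (s + ys.sum)
termination_by xs ys => xs.length + ys.length
decreasing_by
  · simp
  · simp
  · have h1 := consume_len y xs (r + max f s + x)
    have h2 := consume_len y ys (consume y xs (r + max f s + x)).1
    simp; omega

theorem mergeA_nil_left (ys : List Int) (f s r : Int) :
    mergeA [] ys f s r = r + max (f + (0:Int)) (s + ys.sum) := by
  cases ys <;> simp [mergeA]

theorem mergeA_cons_nil (x : Int) (xs : List Int) (f s r : Int) :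
    mergeA (x :: xs) [] f s r = r + max (f + (x :: xs).sum) (s + (0:Int)) := by
  simp [mergeA]

theorem runMerge_nil_left (fuel : Nat) (rb : List (Int × Int)) (f s r : Int) :
    runMerge fuel [] rb f s r = r + max (sumSnd [] f) (sumSnd rb s) := by
  cases fuel with
  | zero => rw [runMerge]
  | succ k =>
    rw [runMerge]
    intro _ _ _ _ _ _ h _
    exact absurd h (by simp)

theorem runMerge_cons_nil (fuel : Nat) (p : Int × Int) (ra : List (Int × Int)) (f s r : Int) :
    runMerge fuel (p :: ra) [] f s r = r + max (sumSnd (p :: ra) f) (sumSnd [] s) := by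
  cases fuel with
  | zero => rw [runMerge]
  | succ k =>
    rcases p with ⟨va, sa⟩
    rw [runMerge]
    intro _ _ _ _ _ _ _ h
    exact absurd h (by simp)

theorem consume_fst (v : Int) (xs : List Int) (acc : Int) :
    (consume v xs acc).1 = acc + (consume v xs 0).1 := by
  induction xs generalizing acc with
  | nil => simp [consume]
  | cons x xs ih =>
    simp only [consume]
    split
    · rw [ih (acc + x), ih (0 + x)]; ring
    · simp

theorem consume_snd (v : Int) (xs : List Int) (acc acc' : Int) :
    (consume v xs acc).2 = (consume v xs acc').2 := by
  induction xs generalizing acc acc' with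
  | nil => simp [consume]
  | cons x xs ih =>
    simp only [consume]
    split
    · exact ih _ _
    · simp

theorem consume_sum (v : Int) (xs : List Int) (acc : Int) :
    (consume v xs acc).1 + (consume v xs acc).2.sum = acc + xs.sum := by
  induction xs generalizing acc with
  | nil => simp [consume]
  | cons x xs ih =>
    simp only [consume]
    split
    · rw [ih]; simp; ring
    · simp

theorem sumSnd_eq (rs : List (Int × Int)) (acc : Int) :
    sumSnd rs acc = acc + (rs.map Prod.snd).sum := by
  induction rs generalizing acc with
  | nil => simp [sumSnd]
  | cons p ps ih => simp [sumSnd, ih]; ring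

theorem runsOf_eq_runs' (fuel : Nat) :
    ∀ xs : List Int, xs.length ≤ fuel → runsOf fuel xs = runs' xs := by
  induction fuel with
  | zero =>
    intro xs h
    have : xs = [] := by cases xs <;> simp_all
    subst this
    rw [runsOf, runs']
  | succ k ih =>
    intro xs h
    cases xs with
    | nil =>
      rw [runsOf, runs']
      simp
    | cons x xs =>
      rw [runsOf, runs']
      have := consume_len x xs x
      rw [ih _ (by simp at h; omega)]

theorem runs'_sum (xs : List Int) :
    ((runs' xs).map Prod.snd).sum = xs.sum := by
  fun_induction runs' with
  | case1 => simp
  | case2 x xs p ih =>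
    simp only [List.map_cons, List.sum_cons]
    rw [ih]
    have := consume_sum x xs x
    simp only [p] at *
    omega

-- mergeA consumes a whole leading run when its value is below the other head
theorem mergeA_run_lt (x y : Int) (ys : List Int) (hxy : x < y) :
    ∀ (xs : List Int) (f s r : Int),
      mergeA (x :: xs) (y :: ys) f s r
        = mergeA (consume x xs 0).2 (y :: ys) (f + x + (consume x xs 0).1) s r := by
  intro xs
  induction xs with
  | nil => intro f s r; simp [mergeA, consume, hxy]
  | cons z zs ih =>
    intro f s r
    by_cases hz : z = x
    · subst hz
      rw [mergeA]
      simp only [if_pos hxy]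
      rw [ih]
      rw [show consume z (z :: zs) (0:Int) = consume z zs z from by simp [consume]]
      rw [consume_fst z zs z, consume_snd z zs z 0]
      ring_nf
    · rw [mergeA]
      simp only [if_pos hxy]
      simp [consume, hz]

theorem mergeA_run_gt (x y : Int) (xs : List Int) (hxy : y < x) :
    ∀ (ys : List Int) (f s r : Int),
      mergeA (x :: xs) (y :: ys) f s r
        = mergeA (x :: xs) (consume y ys 0).2 f (s + y + (consume y ys 0).1) r := by
  intro ys
  induction ys with
  | nil =>
    intro f s r
    rw [mergeA]
    simp only [if_neg (by omega : ¬ x < y), if_pos hxy]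
    simp [consume]
  | cons z zs ih =>
    intro f s r
    by_cases hz : z = y
    · subst hz
      rw [mergeA]
      simp only [if_neg (by omega : ¬ x < z), if_pos hxy]
      rw [ih]
      rw [show consume z (z :: zs) (0:Int) = consume z zs z from by simp [consume]]
      rw [consume_fst z zs z, consume_snd z zs z 0]
      ring_nf
    · rw [mergeA]
      simp only [if_neg (by omega : ¬ x < y), if_pos hxy]
      simp [consume, hz]

theorem runMerge_eq_mergeA (n : Nat) :
    ∀ (fuel : Nat) (xs ys : List Int) (f s r : Int), xs.length + ys.length ≤ n →
      (runs' xs).length + (runs' ys).length ≤ fuel →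
      runMerge fuel (runs' xs) (runs' ys) f s r = mergeA xs ys f s r := by
  induction n with
  | zero =>
    intro fuel xs ys f s r hlen hfuel
    have hx : xs = [] := by cases xs <;> simp_all
    have hy : ys = [] := by cases ys <;> simp_all
    subst hx; subst hy
    rw [show runs' ([] : List Int) = [] from by rw [runs']]
    rw [runMerge_nil_left, mergeA_nil_left]
    simp [sumSnd]
  | succ n ih =>
    intro fuel xs ys f s r hlen hfuel
    rcases xs with _ | ⟨x, xs⟩
    · rw [show runs' ([] : List Int) = [] from by rw [runs']]
      rw [runMerge_nil_left, mergeA_nil_left]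
      rw [sumSnd_eq, sumSnd_eq, runs'_sum]
      simp
    rcases ys with _ | ⟨y, ys⟩
    · rw [show runs' ([] : List Int) = [] from by rw [runs'],
          show runs' (x :: xs) = (x, (consume x xs x).1) :: runs' (consume x xs x).2 from by rw [runs']]
      rw [runMerge_cons_nil, mergeA_cons_nil]
      rw [sumSnd_eq, sumSnd_eq,
          ← show runs' (x :: xs) = (x, (consume x xs x).1) :: runs' (consume x xs x).2 from by rw [runs'],
          runs'_sum]
      simp
    · have hxs := consume_len x xs x
      have hys := consume_len y ys y
      have hrx : runs' (x :: xs) = (x, (consume x xs x).1) :: runs' (consume x xs x).2 := by rw [runs']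
      have hry : runs' (y :: ys) = (y, (consume y ys y).1) :: runs' (consume y ys y).2 := by rw [runs']
      rw [hrx, hry] at hfuel ⊢
      obtain ⟨fk, rfl⟩ : ∃ fk, fuel = fk + 1 := by
        cases fuel with
        | zero => simp at hfuel
        | succ k => exact ⟨k, rfl⟩
      rw [runMerge]
      by_cases hlt : x < y
      · simp only [if_pos hlt]
        rw [← hry]
        rw [ih fk _ _ _ _ _ (by simp at hlen ⊢; omega)
            (by rw [hry]; simp at hfuel ⊢; omega)]
        rw [mergeA_run_lt x y ys hlt xs f s r]
        rw [consume_fst x xs x, consume_snd x xs x 0]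
        ring_nf
      · by_cases hgt : y < x
        · simp only [if_neg hlt, if_pos hgt]
          rw [← hrx]
          rw [ih fk _ _ _ _ _ (by simp at hlen ⊢; omega)
              (by rw [hrx]; simp at hfuel ⊢; omega)]
          rw [mergeA_run_gt x y xs hgt ys f s r]
          rw [consume_fst y ys y, consume_snd y ys y 0]
          ring_nf
        · have hxy : x = y := by omega
          subst hxy
          simp only [if_neg hlt]
          rw [ih fk _ _ _ _ _ (by simp at hlen ⊢; omega) (by simp at hfuel ⊢; omega)]
          rw [mergeA]
          simp only [if_neg hlt]
          have e3 : (consume x ys (consume x xs (r + max f s + x)).1).1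
              = r + max f s + (consume x xs x).1 + (consume x ys x).1 - x := by
            rw [consume_fst x ys ((consume x xs (r + max f s + x)).1),
                consume_fst x xs (r + max f s + x), consume_fst x xs x, consume_fst x ys x]
            ring
          rw [consume_snd x xs x (r + max f s + x),
              consume_snd x ys x ((consume x xs (r + max f s + x)).1), ← e3]

-- ===== index-loop ↔ list lemmas for port A =====

theorem drop_take_cons (a : List Int) (N i : Int) (hi : 0 ≤ i) (hiN : i < N)
    (hNa : N ≤ (a.length : Int)) :
    (a.take N.toNat).drop i.toNat
      = (PySem.List.pyGet? a i).getD 0 :: (a.take N.toNat).drop (i + 1).toNat := by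
  have hlen : i.toNat < a.length := by omega
  have hlt : i.toNat < (a.take N.toNat).length := by simp; omega
  rw [PySem.List.pyGet?_eq_some_getElem a hi (by omega)]
  rw [List.drop_eq_getElem_cons hlt]
  congr 1
  · simp [List.getElem_take]
  · congr 1; omega

theorem drop_take_nil (a : List Int) (N i : Int) (hiN : N ≤ i) :
    (a.take N.toNat).drop i.toNat = [] := by
  apply List.drop_eq_nil_of_le
  simp
  omega

theorem tailLoop_eq (N : Int) (a : List Int) :
    ∀ (fuel : Nat) (acc i : Int), (N - i).toNat ≤ fuel → 0 ≤ i → N ≤ (a.length : Int) →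
      tailLoop fuel N a acc i = acc + ((a.take N.toNat).drop i.toNat).sum := by
  intro fuel
  induction fuel with
  | zero =>
    intro acc i hk hi hN
    rw [tailLoop]
    rw [drop_take_nil a N i (by omega)]
    simp
  | succ k ih =>
    intro acc i hk hi hN
    rw [tailLoop]
    by_cases hlt : i < N
    · rw [if_pos hlt]
      rw [ih _ _ (by omega) (by omega) hN]
      rw [drop_take_cons a N i hi hlt hN]
      simp
      ring
    · rw [if_neg hlt]
      rw [drop_take_nil a N i (by omega)]
      simp

theorem dupLoop_ge (N : Int) (xs : List Int) (temp : Int) :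
    ∀ (fuel : Nat) (res i : Int), i ≤ (dupLoop fuel N xs temp res i).2 := by
  intro fuel
  induction fuel with
  | zero => intro res i; simp [dupLoop]
  | succ k ih =>
    intro res i
    rw [dupLoop]
    split
    · exact le_trans (by omega) (ih _ (i + 1))
    · simp

theorem dupLoop_eq (N : Int) (a : List Int) (v : Int) :
    ∀ (fuel : Nat) (r i : Int), (N - i).toNat ≤ fuel → 0 ≤ i → N ≤ (a.length : Int) →
      (dupLoop fuel N a v r i).1 = (consume v ((a.take N.toNat).drop i.toNat) r).1
      ∧ 0 ≤ (dupLoop fuel N a v r i).2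
      ∧ (a.take N.toNat).drop (dupLoop fuel N a v r i).2.toNat
          = (consume v ((a.take N.toNat).drop i.toNat) r).2 := by
  intro fuel
  induction fuel with
  | zero =>
    intro r i hk hi hN
    rw [dupLoop]
    rw [drop_take_nil a N i (by omega)]
    exact ⟨by simp [consume], hi, by simp [consume]⟩
  | succ k ih =>
    intro r i hk hi hN
    rw [dupLoop]
    by_cases hlt : i < N
    · rw [drop_take_cons a N i hi hlt hN]
      by_cases hv : (PySem.List.pyGet? a i).getD 0 = v
      · rw [if_pos ⟨hlt, hv⟩]
        simp only [consume, if_pos hv]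
        exact ih (r + (PySem.List.pyGet? a i).getD 0) (i + 1) (by omega) (by omega) hN
      · rw [if_neg (by tauto)]
        exact ⟨by simp [consume, hv], hi,
          by simp [consume, hv]; exact drop_take_cons a N i hi hlt hN⟩
    · rw [if_neg (by tauto)]
      rw [drop_take_nil a N i (by omega)]
      exact ⟨by simp [consume], hi, by simp [consume]⟩

theorem mbLoop_eq (N M : Int) (a b : List Int)
    (hNa : N ≤ (a.length : Int)) (hMb : M ≤ (b.length : Int)) :
    ∀ (fuel : Nat) (f s r i j : Int),
      (N - i).toNat + (M - j).toNat ≤ fuel → 0 ≤ i → 0 ≤ j →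
      mbLoop fuel N M a b f s r i j
        = mergeA ((a.take N.toNat).drop i.toNat) ((b.take M.toNat).drop j.toNat) f s r := by
  intro fuel
  induction fuel with
  | zero =>
    intro f s r i j hk hi hj
    rw [mbLoop]
    rw [tailLoop_eq N a ((N - i).toNat) f i (le_refl _) hi hNa,
        tailLoop_eq M b ((M - j).toNat) s j (le_refl _) hj hMb]
    rw [drop_take_nil a N i (by omega)]
    rw [mergeA_nil_left]
    simp
  | succ k ih =>
    intro f s r i j hk hi hj
    rw [mbLoop]
    by_cases hcond : i < N ∧ j < M
    · obtain ⟨hiN, hjM⟩ := hcond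
      rw [if_pos ⟨hiN, hjM⟩]
      have hca := drop_take_cons a N i hi hiN hNa
      have hcb := drop_take_cons b M j hj hjM hMb
      rw [hca, hcb]
      rw [mergeA]
      set ai := (PySem.List.pyGet? a i).getD 0 with hai
      set bj := (PySem.List.pyGet? b j).getD 0 with hbj
      by_cases hlt : ai < bj
      · simp only [if_pos hlt]
        rw [ih _ _ _ _ _ (by omega) (by omega) hj]
        rw [hcb]
      · by_cases hgt : bj < ai
        · simp only [if_neg hlt, if_pos hgt]
          rw [ih _ _ _ _ _ (by omega) hi (by omega)]
          rw [hca]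
        · simp only [if_neg hlt, if_neg hgt]
          have hdA := dupLoop_eq N a bj ((N - (i+1)).toNat) (r + max f s + ai) (i + 1)
            (le_refl _) (by omega) hNa
          have hdB := dupLoop_eq M b bj ((M - (j+1)).toNat)
            (dupLoop ((N - (i+1)).toNat) N a bj (r + max f s + ai) (i + 1)).1 (j + 1)
            (le_refl _) (by omega) hMb
          have hpge := dupLoop_ge N a bj ((N - (i+1)).toNat) (r + max f s + ai) (i + 1)
          have hqge := dupLoop_ge M b bj ((M - (j+1)).toNat)
            (dupLoop ((N - (i+1)).toNat) N a bj (r + max f s + ai) (i + 1)).1 (j + 1)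
          rw [ih _ _ _ _ _ (by omega) hdA.2.1 hdB.2.1]
          rw [hdA.2.2, hdB.2.2, hdB.1, hdA.1]
    · rw [if_neg hcond]
      rw [tailLoop_eq N a ((N - i).toNat) f i (le_refl _) hi hNa,
          tailLoop_eq M b ((M - j).toNat) s j (le_refl _) hj hMb]
      rcases (by omega : N ≤ i ∨ M ≤ j) with hc | hc
      · rw [drop_take_nil a N i hc, mergeA_nil_left]
        simp
      · rw [drop_take_nil b M j hc]
        cases hxs : (a.take N.toNat).drop i.toNat with
        | nil => rw [mergeA_nil_left]; simp
        | cons x xs => rw [mergeA_cons_nil]; simp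

theorem maxBalls_eq_mergeA (N M : Int) (a b : List Int)
    (hNa : N ≤ (a.length : Int)) (hMb : M ≤ (b.length : Int)) :
    maxBalls N M a b = mergeA (a.take N.toNat) (b.take M.toNat) 0 0 0 := by
  unfold maxBalls
  have := mbLoop_eq N M a b hNa hMb (N.toNat + M.toNat + 1) 0 0 0 0 0
    (by omega) (le_refl _) (le_refl _)
  simpa using this

theorem runsMergeAux (xs ys : List Int) :
    runMerge ((runsOf xs.length xs).length + (runsOf ys.length ys).length)
      (runsOf xs.length xs) (runsOf ys.length ys) 0 0 0 = mergeA xs ys 0 0 0 := by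
  rw [runsOf_eq_runs' _ _ (le_refl _), runsOf_eq_runs' _ _ (le_refl _)]
  exact runMerge_eq_mergeA (xs.length + ys.length)
    ((runs' xs).length + (runs' ys).length) _ _ 0 0 0 (le_refl _) (le_refl _)

theorem maxBalls_alt_eq_mergeA (N M : Int) (a b : List Int) :
    maxBalls_alt N M a b = mergeA (a.take N.toNat) (b.take M.toNat) 0 0 0 := by
  unfold maxBalls_alt
  rw [PySem.List.slice_to a (by omega : (0:Int) ≤ max N 0),
      PySem.List.slice_to b (by omega : (0:Int) ≤ max M 0)]
  rw [show (max N 0).toNat = N.toNat from by omega, show (max M 0).toNat = M.toNat from by omega]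
  exact runsMergeAux (a.take N.toNat) (b.take M.toNat)

-- ===== VERDICT (by name: the statement is the Claim_ definition above) =====
theorem maxBalls_spec : Claim_equal_maxBalls := by
  intro N M a b _hD hPre
  unfold Spec_maxBalls
  rw [maxBalls_eq_mergeA N M a b hPre.1 hPre.2, maxBalls_alt_eq_mergeA N M a b]
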